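-- pv_equiv track=rewrite | github.com/Barbod1380/KedroPipeline-Jules | src/data_pipeline/pipelines/utils/detect_region_by_words_gilan.py | predict_by_rule
-- ===== SOURCE A (Python) =====
-- from typing import List, Tuple
--
-- def predict_by_rule(input_string: str, rules=List[Tuple]) -> int:
--     matched_outputs = set()
--     for conditions, number in rules:
--         match = True
--         for operator, phrase in conditions:
--             if operator == " + ":
--                 if phrase not in input_string:
--                     match = False
--                     break
--             elif operator == " - ":
--                 if phrase in input_string:
--                     match = False
--                     break
--         if match:
--             matched_outputs.add(number)
--             # Early exit if we already have multiple distinct outputs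
--             if len(matched_outputs) >= 2:
--                 return -1
--
--     return matched_outputs.pop() if len(matched_outputs) == 1 else -1
-- ===== SOURCE B (Python) =====
-- from typing import List, Tuple
--
-- def predict_by_rule(input_string: str, rules=List[Tuple]) -> int:
--     # One pass over the input per distinct phrase length: put every window
--     # (substring) of those lengths into a set, then evaluate each rule purely
--     # by set membership -- no per-(rule,phrase) substring scan of the input.
--     lengths = {len(phrase) for conditions, _ in rules for _, phrase in conditions}
--     windows = {input_string[i:i + L]
--                for L in lengths
--                for i in range(len(input_string) - L + 1)}
--     matched = {number for conditions, number in rules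
--                if all((phrase in windows) if op == " + "
--                       else (phrase not in windows) if op == " - "
--                       else True
--                       for op, phrase in conditions)}
--     return matched.pop() if len(matched) == 1 else -1
-- ===== Notes on version B (the rewrite author's own statement) =====
-- stated objective: alternative
-- what changed: B never scans the input per (rule,phrase): it collects the set of distinct phrase lengths, builds one set of ALL windows (substrings) of the input of those lengths, and then evaluates every rule by pure set-membership of its phrases in that window set, collecting matched numbers with a set comprehension instead of A's nested loops with break and early exit.
import Mathlib
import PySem

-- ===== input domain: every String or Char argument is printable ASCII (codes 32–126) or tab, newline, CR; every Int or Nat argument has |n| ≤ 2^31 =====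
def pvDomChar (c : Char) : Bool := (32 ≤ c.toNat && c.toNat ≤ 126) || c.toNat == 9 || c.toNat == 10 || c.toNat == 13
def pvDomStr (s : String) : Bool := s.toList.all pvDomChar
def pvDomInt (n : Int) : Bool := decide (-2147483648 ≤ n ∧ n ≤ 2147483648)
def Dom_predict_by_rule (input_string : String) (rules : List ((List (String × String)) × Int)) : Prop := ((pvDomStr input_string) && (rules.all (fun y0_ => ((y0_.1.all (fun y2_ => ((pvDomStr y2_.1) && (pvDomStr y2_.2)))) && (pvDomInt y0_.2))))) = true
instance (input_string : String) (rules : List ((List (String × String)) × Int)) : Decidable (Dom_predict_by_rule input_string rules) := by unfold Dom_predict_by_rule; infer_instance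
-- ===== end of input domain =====

-- B replaces A's per-(rule,phrase) substring scans by one set of all input windows of the
-- occurring phrase lengths, evaluated by set membership; objective: alternative.

-- ===== PORT A =====
-- A's inner 'for operator, phrase in conditions' with break: returns the final value of `match`.
def pyMatchA (input_string : String) : List (String × String) → Bool
  | [] => true
  | (op, phrase) :: rest =>
    if op == " + " then
      if PySem.Str.isIn phrase input_string = false then false
      else pyMatchA input_string rest
    else if op == " - " then
      if PySem.Str.isIn phrase input_string = true then false
      else pyMatchA input_string rest
    else pyMatchA input_string rest

-- A's outer loop over rules, with the early `return -1` and the final pop/-1.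
def pyLoopA (input_string : String) : List ((List (String × String)) × Int) → PySem.Set Int → Int
  | [], acc => if PySem.Set.len acc = 1 then acc.headD 0 else -1
  | (conds, n) :: rest, acc =>
    if pyMatchA input_string conds then
      let acc' := PySem.Set.add acc n
      if 2 ≤ PySem.Set.len acc' then -1 else pyLoopA input_string rest acc'
    else pyLoopA input_string rest acc

def predict_by_rule (input_string : String) (rules : List ((List (String × String)) × Int)) : Int :=
  pyLoopA input_string rules PySem.Set.empty

-- ===== PORT B =====
-- lengths = {len(phrase) for conditions, _ in rules for _, phrase in conditions}
def pvLengths (rules : List ((List (String × String)) × Int)) : PySem.Set Int :=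
  PySem.Set.ofList (rules.flatMap (fun r => r.1.map (fun c => PySem.Str.len c.2)))

-- windows = {input_string[i:i+L] for L in lengths for i in range(len(input_string) - L + 1)}
-- (a set built by iterating a set: membership-only use, order-independent)
def pvWindows (s : String) (lengths : PySem.Set Int) : PySem.Set String :=
  PySem.Set.ofList (lengths.flatMap (fun L =>
    (PySem.List.pyRange 0 (PySem.Str.len s - L + 1)).map
      (fun i => PySem.Str.slice s (some i) (some (i + L)))))

-- one conjunct of B's all(...): (phrase in windows) if op==" + " else (phrase not in windows) if op==" - " else True
def pvCondB (windows : PySem.Set String) (c : String × String) : Bool :=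
  if c.1 == " + " then PySem.Set.contains windows c.2
  else if c.1 == " - " then !(PySem.Set.contains windows c.2)
  else true

def predict_by_rule_alt (input_string : String) (rules : List ((List (String × String)) × Int)) : Int :=
  let windows := pvWindows input_string (pvLengths rules)
  let matched : PySem.Set Int :=
    PySem.Set.ofList ((rules.filter (fun r => r.1.all (pvCondB windows))).map (·.2))
  if PySem.Set.len matched = 1 then matched.headD 0 else -1

-- ===== PRECONDITION & SPEC =====
def Spec_predict_by_rule (input_string : String) (rules : List ((List (String × String)) × Int)) (out : Int) : Prop := out = predict_by_rule_alt input_string rules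
instance (input_string : String) (rules : List ((List (String × String)) × Int)) (out : Int) : Decidable (Spec_predict_by_rule input_string rules out) := by unfold Spec_predict_by_rule; infer_instance

-- ===== CLAIM (what is proved, stated in full; the proofs are below) =====
def Claim_equal_predict_by_rule : Prop := ∀ (input_string : String) (rules : List ((List (String × String)) × Int)), Dom_predict_by_rule input_string rules → Spec_predict_by_rule input_string rules (predict_by_rule input_string rules)

-- ===== LEMMAS AND PROOFS =====

-- every slice of a string is a substring of it
theorem pvSlice_isIn (s : String) (a b : Int) :
    PySem.Str.isIn (PySem.Str.slice s (some a) (some b)) s = true := by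
  rw [PySem.Str.isIn_iff_infix, PySem.Str.toList_slice]
  simp only [PySem.Chars.slice_eq_listSlice, PySem.List.slice]
  exact ((List.take_prefix _ _).isInfix).trans ((List.drop_suffix _ _).isInfix)

-- the window set answers exactly substring containment, for every phrase whose length it covers
theorem pvWindows_contains (s ph : String) (lengths : PySem.Set Int)
    (hL : PySem.Str.len ph ∈ lengths) :
    PySem.Set.contains (pvWindows s lengths) ph = PySem.Str.isIn ph s := by
  by_cases hin : PySem.Str.isIn ph s = true
  · rw [hin]
    rw [PySem.Set.contains_iff]
    unfold pvWindows
    rw [PySem.Set.mem_ofList, List.mem_flatMap]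
    refine ⟨PySem.Str.len ph, hL, ?_⟩
    rw [List.mem_map]
    -- extract a starting index from containment
    rw [PySem.Str.isIn_eq] at hin
    rcases (PySem.Chars.exists_prefix_drop_iff_isIn ph.toList s.toList).mpr hin with ⟨j, hpre⟩
    by_cases hnil : ph.toList = []
    · -- empty phrase: window at i = 0 with L = 0
      refine ⟨0, ?_, ?_⟩
      · rw [PySem.List.mem_pyRange_one]
        have : PySem.Str.len ph = 0 := by
          rw [PySem.Str.len_eq, hnil]; rfl
        have h0 : (0:Int) ≤ PySem.Str.len s := by
          rw [PySem.Str.len_eq]; exact_mod_cast Nat.zero_le _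
        constructor <;> omega
      · have hlen0 : PySem.Str.len ph = 0 := by rw [PySem.Str.len_eq, hnil]; rfl
        have hph : ph = "" := String.toList_inj.mp (by rw [hnil]; rfl)
        rw [hlen0, hph]
        apply String.toList_inj.mp
        rw [PySem.Str.toList_slice]
        simp [PySem.Chars.slice_eq_listSlice, PySem.List.slice, PySem.List.clampIdx]
    · -- nonempty phrase: the prefix-of-drop index j is a valid window start
      have hlen : j + ph.toList.length ≤ s.toList.length := by
        have hle : ph.toList.length ≤ (s.toList.drop j).length := hpre.length_le
        rw [List.length_drop] at hle
        have hpos : 0 < ph.toList.length := List.length_pos_iff.mpr hnil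
        omega
      refine ⟨(j : Int), ?_, ?_⟩
      · rw [PySem.List.mem_pyRange_one]
        rw [PySem.Str.len_eq, PySem.Str.len_eq]
        constructor
        · exact_mod_cast Nat.zero_le _
        · omega
      · apply String.toList_inj.mp
        rw [PySem.Str.toList_slice]
        simp only [PySem.Chars.slice_eq_listSlice]
        rw [PySem.Str.len_eq]
        have : ((j : Int) + (ph.toList.length : Int)) = ((j : Nat) : Int) + ((ph.toList.length : Nat) : Int) := by ring
        rw [this, PySem.List.slice_natCast_add]
        exact (List.prefix_iff_eq_take.mp hpre).symm
  · -- ph is not a substring: no window can equal ph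
    simp only [Bool.not_eq_true] at hin
    rw [hin, Bool.eq_false_iff]
    intro hcon
    rw [PySem.Set.contains_iff] at hcon
    unfold pvWindows at hcon
    rw [PySem.Set.mem_ofList, List.mem_flatMap] at hcon
    rcases hcon with ⟨L, _, hmem⟩
    rw [List.mem_map] at hmem
    rcases hmem with ⟨i, _, hslice⟩
    rw [← hslice, pvSlice_isIn] at hin
    exact absurd hin (by decide)

-- every phrase length occurring in the rules is collected by pvLengths
theorem pvLengths_mem (rules : List ((List (String × String)) × Int))
    (r : (List (String × String)) × Int) (hr : r ∈ rules) (c : String × String) (hc : c ∈ r.1) :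
    PySem.Str.len c.2 ∈ pvLengths rules := by
  unfold pvLengths
  rw [PySem.Set.mem_ofList, List.mem_flatMap]
  exact ⟨r, hr, List.mem_map_of_mem hc⟩

-- A's inner loop agrees with B's all() once the window set answers containment for the rule's phrases
theorem pyMatchA_eq_all (inp : String) (windows : PySem.Set String)
    (conds : List (String × String))
    (h : ∀ c ∈ conds, PySem.Set.contains windows c.2 = PySem.Str.isIn c.2 inp) :
    pyMatchA inp conds = conds.all (pvCondB windows) := by
  induction conds with
  | nil => rfl
  | cons c rest ih =>
    have hc := h c (List.mem_cons_self)
    have hrest := ih (fun x hx => h x (List.mem_cons_of_mem _ hx))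
    obtain ⟨op, ph⟩ := c
    simp only at hc
    have hdec : decide (ph ∈ windows) = PySem.Str.isIn ph inp := by
      rw [← hc]; by_cases hm : ph ∈ windows <;> simp [hm]
    by_cases h1 : (op == " + ") = true
    · cases hIn : PySem.Str.isIn ph inp <;>
        simp [pyMatchA, pvCondB, h1, hdec, hrest, List.all_cons]
    · by_cases h2 : (op == " - ") = true
      · cases hIn : PySem.Str.isIn ph inp <;>
          simp [pyMatchA, pvCondB, h1, h2, hdec, hrest, List.all_cons]
      · simp [pyMatchA, pvCondB, h1, h2, hrest, List.all_cons]

-- adding elements never shrinks a set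
theorem pvLen_le_add (s : PySem.Set Int) (n : Int) : PySem.Set.len s ≤ PySem.Set.len (PySem.Set.add s n) := by
  simp only [PySem.Set.add, PySem.Set.len]
  split
  · exact le_refl _
  · simp

theorem pvLen_le_update (s : PySem.Set Int) (xs : List Int) :
    PySem.Set.len s ≤ PySem.Set.len (PySem.Set.update s xs) := by
  induction xs generalizing s with
  | nil => exact le_refl _
  | cons x rest ih =>
    exact le_trans (pvLen_le_add s x) (ih (PySem.Set.add s x))

-- A's outer loop computes the unique-or--1 of acc extended by all matched numbers
theorem pyLoopA_eq (inp : String) (rules : List ((List (String × String)) × Int)) :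
    ∀ acc : PySem.Set Int,
      pyLoopA inp rules acc =
        (let S := PySem.Set.update acc ((rules.filter (fun r => pyMatchA inp r.1)).map (·.2));
         if PySem.Set.len S = 1 then S.headD 0 else -1) := by
  induction rules with
  | nil => intro acc; rfl
  | cons r rest ih =>
    intro acc
    obtain ⟨conds, n⟩ := r
    by_cases hm : pyMatchA inp conds = true
    · simp only [pyLoopA, List.filter_cons, hm]
      by_cases hlen : 2 ≤ PySem.Set.len (PySem.Set.add acc n)
      · rw [if_pos hlen]
        have hupd : PySem.Set.update acc (n :: (rest.filter (fun r => pyMatchA inp r.1)).map (·.2)) =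
            PySem.Set.update (PySem.Set.add acc n) ((rest.filter (fun r => pyMatchA inp r.1)).map (·.2)) := rfl
        have h2 : 2 ≤ PySem.Set.len (PySem.Set.update acc (n :: (rest.filter (fun r => pyMatchA inp r.1)).map (·.2))) := by
          rw [hupd]; exact le_trans hlen (pvLen_le_update _ _)
        show (-1 : Int) = if PySem.Set.len (PySem.Set.update acc (n :: (rest.filter (fun r => pyMatchA inp r.1)).map (·.2))) = 1
          then (PySem.Set.update acc (n :: (rest.filter (fun r => pyMatchA inp r.1)).map (·.2))).headD 0 else -1
        rw [if_neg (by omega)]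
      · rw [if_neg hlen]
        exact ih (PySem.Set.add acc n)
    · simp only [pyLoopA]
      rw [if_neg hm]
      simp only [List.filter_cons, hm]
      exact ih acc

-- ===== VERDICT (by name: the statement is the Claim_ definition above) =====
theorem predict_by_rule_spec : Claim_equal_predict_by_rule := by
  intro inp rules _
  unfold Spec_predict_by_rule predict_by_rule predict_by_rule_alt
  rw [pyLoopA_eq]
  have hfilter : rules.filter (fun r => pyMatchA inp r.1) =
      rules.filter (fun r => r.1.all (pvCondB (pvWindows inp (pvLengths rules)))) := by
    apply List.filter_congr
    intro r hr
    rw [pyMatchA_eq_all inp (pvWindows inp (pvLengths rules)) r.1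
      (fun c hc => pvWindows_contains inp c.2 (pvLengths rules) (pvLengths_mem rules r hr c hc))]
  simp only [hfilter]
  rfl
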